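-- pv_equiv track=rewrite | github.com/Thybat/EulerProject | Power digit sum.py | sum_pow
-- ===== SOURCE A (Python) =====
-- def exoPuiss2(x):
--     num=1
--     for i in range(1,x+1):
--         num=2*num
--     return num
--
-- def sum_pow(x):
--     string=str(exoPuiss2(x))
--     size=0
--     somme=0
--     size=len(string)
--     for i in range(0,size):
--         somme=int(string[i])+somme
--
--     return somme
-- ===== SOURCE B (Python) =====
-- def sum_pow(x):
--     num = 1 << max(x, 0)
--     total = 0
--     while num > 0:
--         total += num % 10
--         num //= 10
--     return total
-- ===== Notes on version B (the rewrite author's own statement) =====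
-- stated objective: idiomatic
-- what changed: B computes the power with a single left shift and sums its decimal digits arithmetically with a divmod loop, instead of A's doubling loop plus string conversion and per-character int() summing.
import Mathlib
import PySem

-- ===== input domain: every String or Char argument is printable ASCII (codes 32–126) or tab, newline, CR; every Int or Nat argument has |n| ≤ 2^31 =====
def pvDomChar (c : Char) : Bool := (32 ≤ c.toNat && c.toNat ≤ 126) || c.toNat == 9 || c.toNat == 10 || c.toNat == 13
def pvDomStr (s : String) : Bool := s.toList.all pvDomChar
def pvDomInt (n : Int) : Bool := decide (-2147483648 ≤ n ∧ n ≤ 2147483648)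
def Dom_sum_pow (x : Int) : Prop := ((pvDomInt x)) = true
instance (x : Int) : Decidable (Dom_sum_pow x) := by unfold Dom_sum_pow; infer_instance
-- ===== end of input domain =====

-- B computes the power with a single left shift and sums its decimal digits arithmetically
-- with a divmod loop, instead of A's doubling loop plus string conversion and per-character
-- int() summing (objective: idiomatic).

-- ===== PORT A =====
-- int(s[i]) inside A's loop; there s[i] is always an in-range decimal digit character,
-- so neither the index lookup nor the parse can fail (the 0 defaults are unreachable).
def pyIntAt (s : String) (i : Int) : Int :=
  match PySem.Str.pyGet? s i with
  | some c => (PySem.Int.ofChars? [c]).getD 0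
  | none => 0

def exoPuiss2 (x : Int) : Int :=
  (PySem.List.pyRange 1 (x + 1) 1).foldl (fun num _ => 2 * num) 1

def sum_pow (x : Int) : Int :=
  let string := PySem.Int.toStr (exoPuiss2 x)
  let size : Int := PySem.Str.len string
  (PySem.List.pyRange 0 size 1).foldl (fun somme i => pyIntAt string i + somme) 0

-- ===== PORT B =====
-- the 'while num is positive: add last digit, drop it' loop of Source B
def digitSumLoop (num total : Int) : Int :=
  if 0 < num then
    digitSumLoop (PySem.Int.floordiv num 10) (total + PySem.Int.mod num 10)
  else total
termination_by num.toNat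
decreasing_by
  rw [PySem.Int.floordiv_eq_ediv_of_pos (by omega)]
  omega

def sum_pow_alt (x : Int) : Int :=
  digitSumLoop ((1 : Int) <<< (max x 0).toNat) 0

-- ===== PRECONDITION & SPEC =====
def Spec_sum_pow (x : Int) (out : Int) : Prop := out = sum_pow_alt x
instance (x : Int) (out : Int) : Decidable (Spec_sum_pow x out) := by unfold Spec_sum_pow; infer_instance

-- ===== CLAIM (what is proved, stated in full; the proofs are below) =====
def Claim_equal_sum_pow : Prop := ∀ (x : Int), Dom_sum_pow x → Spec_sum_pow x (sum_pow x)

-- ===== LEMMAS AND PROOFS =====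

-- the numeric value of a single decimal-digit character, as A's int(s[i]) computes it
def dval (c : Char) : Int := (PySem.Int.ofChars? [c]).getD 0

lemma dval_digitChar {d : Nat} (h : d < 10) : dval (Nat.digitChar d) = (d : Int) := by
  interval_cases d <;> decide

lemma foldl_double (l : List Int) (init : Int) :
    l.foldl (fun a _ => 2 * a) init = 2 ^ l.length * init := by
  induction l generalizing init with
  | nil => simp
  | cons h t ih => simp [List.foldl, ih, pow_succ]; ring

lemma pyGet?_of_inrange (cs : List Char) (i : Int) (h0 : 0 ≤ i) (h1 : i < cs.length) :
    PySem.List.pyGet? cs i = some (PySem.List.pyGetD cs i '0') := by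
  have hk : i.toNat < cs.length := by omega
  simp only [PySem.List.pyGetD, PySem.List.pyGet?, PySem.List.pyIdx?, if_pos h0, if_pos h1]
  simp [List.getElem?_eq_getElem hk]

lemma toDigitsCore_dval_sum :
    ∀ (f n : Nat) (acc : List Char), n < f →
      ((Nat.toDigitsCore 10 f n acc).map dval).sum
        = ((Nat.digits 10 n).sum : Int) + (acc.map dval).sum := by
  intro f
  induction f with
  | zero => intro n acc h; omega
  | succ f ih =>
    intro n acc h
    rw [Nat.toDigitsCore]
    by_cases h0 : n / 10 = 0
    · rw [if_pos h0]
      rcases Nat.eq_zero_or_pos n with hn | hn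
      · subst hn; simp [dval_digitChar (by omega : (0:Nat) % 10 < 10)]
      · rw [Nat.digits_def' (by norm_num) hn, h0]
        simp [dval_digitChar (Nat.mod_lt n (by norm_num) : n % 10 < 10)]
    · rw [if_neg h0]
      rw [ih (n / 10) _ (by omega)]
      rw [Nat.digits_def' (by norm_num) (by omega : 0 < n)]
      simp only [List.map_cons, List.sum_cons,
        dval_digitChar (Nat.mod_lt n (by norm_num) : n % 10 < 10)]
      push_cast
      ring

lemma digitSumLoop_eq (m : Nat) (t : Int) :
    digitSumLoop (m : Int) t = t + ((Nat.digits 10 m).sum : Int) := by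
  induction m using Nat.strong_induction_on generalizing t with
  | _ m ih =>
    rw [digitSumLoop]
    rcases Nat.eq_zero_or_pos m with hm | hm
    · subst hm; simp
    · rw [if_pos (by exact_mod_cast hm)]
      have hdiv : PySem.Int.floordiv (m : Int) 10 = ((m / 10 : Nat) : Int) := by
        exact_mod_cast PySem.Int.floordiv_natCast m 10
      have hmod : PySem.Int.mod (m : Int) 10 = ((m % 10 : Nat) : Int) := by
        exact_mod_cast PySem.Int.mod_natCast m 10
      rw [hdiv, hmod, ih (m / 10) (Nat.div_lt_self hm (by norm_num))]
      rw [Nat.digits_def' (by norm_num) hm]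
      simp only [List.sum_cons]
      push_cast
      ring

lemma strSum (m : Nat) :
    (PySem.List.pyRange 0 (PySem.Str.len (PySem.Int.toStr (m : Int))) 1).foldl
      (fun somme i => pyIntAt (PySem.Int.toStr (m : Int)) i + somme) 0
      = ((Nat.digits 10 m).sum : Int) := by
  have hts : (PySem.Int.toStr (m : Int)).toList = Nat.toDigits 10 m := by
    rw [PySem.Int.toList_toStr]
    simp [PySem.Int.toChars]
  have hlen : PySem.Str.len (PySem.Int.toStr (m : Int))
      = ((Nat.toDigits 10 m).length : Int) := by
    rw [PySem.Str.len_eq, hts]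
  rw [hlen]
  rw [PySem.List.foldl_congr_mem _ _
        (fun somme i => somme + dval (PySem.List.pyGetD (Nat.toDigits 10 m) i '0')) 0
        (by
          intro acc i hi
          rw [PySem.List.mem_pyRange_one] at hi
          rw [pyIntAt, PySem.Str.pyGet?, hts, PySem.Chars.pyGet?,
            pyGet?_of_inrange _ _ hi.1 (by exact_mod_cast hi.2)]
          exact add_comm _ _)]
  rw [PySem.List.foldl_pyRange_zero_pyGetD' (Nat.toDigits 10 m) '0'
        (fun acc c => acc + dval c) 0]
  rw [PySem.List.foldl_add, zero_add]
  have := toDigitsCore_dval_sum (m + 1) m [] (by omega)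
  simpa [Nat.toDigits] using this

theorem sum_pow_eq_alt (x : Int) : sum_pow x = sum_pow_alt x := by
  have hexo : exoPuiss2 x = ((2 ^ x.toNat : Nat) : Int) := by
    rw [exoPuiss2, foldl_double, PySem.List.length_pyRange_one]
    have : (x + 1 - 1).toNat = x.toNat := by omega
    rw [this]
    push_cast
    ring
  have hA : sum_pow x = ((Nat.digits 10 (2 ^ x.toNat)).sum : Int) := by
    rw [sum_pow]
    simp only [hexo]
    exact strSum (2 ^ x.toNat)
  have hB : sum_pow_alt x = ((Nat.digits 10 (2 ^ x.toNat)).sum : Int) := by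
    rw [sum_pow_alt, Int.shiftLeft_eq, one_mul]
    have hmax : (max x 0).toNat = x.toNat := by omega
    rw [hmax]
    have h2 : ((2 : Int) ^ x.toNat) = ((2 ^ x.toNat : Nat) : Int) := by push_cast; ring
    rw [h2, digitSumLoop_eq, zero_add]
  rw [hA, hB]

-- ===== VERDICT (by name: the statement is the Claim_ definition above) =====
theorem sum_pow_spec : Claim_equal_sum_pow := by
  intro x _
  exact sum_pow_eq_alt x
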